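-- pv_equiv track=rewrite | github.com/njmuggio/aoc2024 | 21/p2.py | dpad_code_len
-- ===== SOURCE A (Python) =====
-- def offx_char(offx):
--   return "<" if offx < 0 else ">"
--
-- def offy_char(offy):
--   return "^" if offy < 0 else "v"
--
-- memo = {i: {} for i in range(26)}
--
-- def dpad_code_len(start, end, depth) -> int:
--   if (start, end) in memo[depth]:
--     return memo[depth][(start, end)]
--
--   sx, sy = dpad[start]
--   ex, ey = dpad[end]
--   ox = ex - sx
--   oy = ey - sy
--
--   def recur(path) -> int:
--     if depth == 1:
--       return len(path)
--
--     path = "A" + path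
--     total_len = 0
--     for idx in range(len(path) - 1):
--       total_len += dpad_code_len(path[idx], path[idx+1], depth - 1)
--     return total_len
--
--   if ox == 0 or oy == 0:
--     path = abs(oy) * offy_char(oy) + abs(ox) * offx_char(ox) + "A"
--     memo[depth][(start, end)] = recur(path)
--     return memo[depth][(start, end)]
--   else:
--     if start == "<":
--       # Must move right first
--       path = abs(ox) * offx_char(ox) + abs(oy) * offy_char(oy) + "A"
--       memo[depth][(start, end)] = recur(path)
--       return memo[depth][(start, end)]
--
--     if end == "<":
--       # Must move down first
--       path = abs(oy) * offy_char(oy) + abs(ox) * offx_char(ox) + "A"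
--       memo[depth][(start, end)] = recur(path)
--       return memo[depth][(start, end)]
--
--     # Need to try both vertical and horizontal first
--     vert_path = abs(oy) * offy_char(oy) + abs(ox) * offx_char(ox) + "A"
--     vert = recur(vert_path)
--
--     horiz_path = abs(ox) * offx_char(ox) + abs(oy) * offy_char(oy) + "A"
--     horiz = recur(horiz_path)
--
--     if vert <= horiz:
--       memo[depth][(start, end)] = vert
--       return vert
--     memo[depth][(start, end)] = horiz
--     return horiz
--
-- dpad = {
--   "A": (2, 0),
--   "^": (1, 0),
--   "<": (0, 1),
--   "v": (1, 1),
--   ">": (2, 1),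
-- }
-- ===== SOURCE B (Python) =====
-- # Bottom-up dynamic programming over depth: a single cost table per level replaces the
-- # memoized top-down recursion, and the hard-coded branch ladder becomes a filter-and-min
-- # over the two candidate orderings (vertical-first preferred on ties).
-- KEYS = "A^<v>"
-- POS = {"A": (2, 0), "^": (1, 0), "<": (0, 1), "v": (1, 1), ">": (2, 1)}
--
-- def _candidates(a, b):
--   sx, sy = POS[a]
--   ex, ey = POS[b]
--   vert = ("^" if ey < sy else "v") * abs(ey - sy)
--   horiz = ("<" if ex < sx else ">") * abs(ex - sx)
--   cands = []
--   if not (sx == 0 and ey == 0):  # vertical-first never crosses the gap at (0, 0)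
--     cands.append(vert + horiz + "A")
--   if not (ex == 0 and sy == 0):  # horizontal-first never crosses the gap at (0, 0)
--     cands.append(horiz + vert + "A")
--   return cands
--
-- def dpad_code_len(start, end, depth) -> int:
--   pairs = [(a, b) for a in KEYS for b in KEYS]
--   cost = {ab: min(len(p) for p in _candidates(*ab)) for ab in pairs}
--   for _ in range(depth - 1):
--     cost = {ab: min(sum(cost[pq] for pq in zip("A" + c, c)) for c in _candidates(*ab))
--             for ab in pairs}
--   return cost[(start, end)]
-- ===== Notes on version B (the rewrite author's own statement) =====
-- stated objective: alternative
-- what changed: Replaces the memoized top-down recursion with its hard-coded gap-avoidance branch ladder by an iterative bottom-up dynamic program that rebuilds one 25-entry cost table per depth level, computing each entry as a filter-and-minimize over the two candidate move orderings (vertical-first preferred on ties).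
import Mathlib
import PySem

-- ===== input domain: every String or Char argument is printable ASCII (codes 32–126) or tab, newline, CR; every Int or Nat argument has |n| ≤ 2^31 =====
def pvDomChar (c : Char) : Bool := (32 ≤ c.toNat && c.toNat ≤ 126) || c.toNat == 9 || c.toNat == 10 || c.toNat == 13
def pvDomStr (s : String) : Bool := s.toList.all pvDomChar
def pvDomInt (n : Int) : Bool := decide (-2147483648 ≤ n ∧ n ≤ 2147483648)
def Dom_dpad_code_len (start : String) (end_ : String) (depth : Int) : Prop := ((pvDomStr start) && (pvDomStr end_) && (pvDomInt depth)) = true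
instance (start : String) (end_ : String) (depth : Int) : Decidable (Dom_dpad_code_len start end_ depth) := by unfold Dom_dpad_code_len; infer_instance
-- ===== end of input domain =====

-- B replaces A's memoized top-down recursion and hard-coded branch ladder by a bottom-up
-- cost table per depth with a filter-and-minimize over the two candidate key orderings
-- (objective: alternative decomposition, same asymptotic cost).
-- A's module-level memo dict is a pure cache (consistent across calls), so the return value
-- is the same as with a fresh memo; the ports thread the memo explicitly from empty.

-- ===== PORT A =====
-- dpad[c]: KeyError on any other string (excluded by Pre_); keys are five 1-char strings,
-- represented by their single Char (the default branch is unreachable under Pre_).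
def pvDpadPos (c : Char) : Int × Int :=
  if c = 'A' then (2, 0) else if c = '^' then (1, 0) else if c = '<' then (0, 1)
  else if c = 'v' then (1, 1) else (2, 1)

def pvOffxChar (offx : Int) : Char := if offx < 0 then '<' else '>'
def pvOffyChar (offy : Int) : Char := if offy < 0 then '^' else 'v'

-- the global memo, threaded explicitly: memo[depth][(start, end)] becomes key (depth, start, end)
mutual
-- dpad_code_len(start, end, depth) at depth = fuel (fuel 0 unreachable under Pre_: Python
-- raises KeyError on memo[-1]/memo[0-lookup chain] before any depth-0 value is produced)
def pvGoA : Nat → Char → Char → PySem.Dict (Nat × Char × Char) Int → Int × PySem.Dict (Nat × Char × Char) Int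
  | 0, _, _, m => (0, m)
  | d+1, s, e, m =>
    match m.get? (d+1, s, e) with
    | some v => (v, m)
    | none =>
      let sp := pvDpadPos s
      let ep := pvDpadPos e
      let ox := ep.1 - sp.1
      let oy := ep.2 - sp.2
      if ox = 0 ∨ oy = 0 then
        let path := List.replicate oy.natAbs (pvOffyChar oy) ++ List.replicate ox.natAbs (pvOffxChar ox) ++ ['A']
        let r := pvRecurA d path m
        (r.1, r.2.insert (d+1, s, e) r.1)
      else if s = '<' then
        -- Must move right first
        let path := List.replicate ox.natAbs (pvOffxChar ox) ++ List.replicate oy.natAbs (pvOffyChar oy) ++ ['A']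
        let r := pvRecurA d path m
        (r.1, r.2.insert (d+1, s, e) r.1)
      else if e = '<' then
        -- Must move down first
        let path := List.replicate oy.natAbs (pvOffyChar oy) ++ List.replicate ox.natAbs (pvOffxChar ox) ++ ['A']
        let r := pvRecurA d path m
        (r.1, r.2.insert (d+1, s, e) r.1)
      else
        -- Need to try both vertical and horizontal first
        let vertPath := List.replicate oy.natAbs (pvOffyChar oy) ++ List.replicate ox.natAbs (pvOffxChar ox) ++ ['A']
        let rv := pvRecurA d vertPath m
        let horizPath := List.replicate ox.natAbs (pvOffxChar ox) ++ List.replicate oy.natAbs (pvOffyChar oy) ++ ['A']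
        let rh := pvRecurA d horizPath rv.2
        if rv.1 ≤ rh.1 then (rv.1, rh.2.insert (d+1, s, e) rv.1)
        else (rh.1, rh.2.insert (d+1, s, e) rh.1)
  termination_by n _ _ _ => (4*n, 0)

-- recur(path) inside dpad_code_len at fuel d+1: depth == 1 ↔ d = 0
def pvRecurA (d : Nat) (path : List Char) (m : PySem.Dict (Nat × Char × Char) Int) : Int × PySem.Dict (Nat × Char × Char) Int :=
  if d = 0 then ((path.length : Int), m)
  else pvLoopA d (('A' :: path).zip path) 0 m
  termination_by (4*d+3, 0)

-- for idx in range(len(path)-1): total_len += dpad_code_len(path[idx], path[idx+1], depth-1)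
def pvLoopA (d : Nat) : List (Char × Char) → Int → PySem.Dict (Nat × Char × Char) Int → Int × PySem.Dict (Nat × Char × Char) Int
  | [], acc, m => (acc, m)
  | pr :: rest, acc, m =>
    let r := pvGoA d pr.1 pr.2 m
    pvLoopA d rest (acc + r.1) r.2
  termination_by l _ _ => (4*d+2, l.length)
end

def dpad_code_len (start : String) (end_ : String) (depth : Int) : Int :=
  (pvGoA depth.toNat (start.toList.headD ' ') (end_.toList.headD ' ') PySem.Dict.empty).1

-- ===== PORT B =====
def pvKeys : List Char := ['A', '^', '<', 'v', '>']

def pvPosB (c : Char) : Int × Int :=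
  if c = 'A' then (2, 0) else if c = '^' then (1, 0) else if c = '<' then (0, 1)
  else if c = 'v' then (1, 1) else (2, 1)

def pvCandidates (a b : Char) : List (List Char) :=
  let sp := pvPosB a
  let ep := pvPosB b
  let vert := List.replicate (ep.2 - sp.2).natAbs (if ep.2 < sp.2 then '^' else 'v')
  let horiz := List.replicate (ep.1 - sp.1).natAbs (if ep.1 < sp.1 then '<' else '>')
  (if (sp.1 = 0 ∧ ep.2 = 0) then [] else [vert ++ horiz ++ ['A']]) ++
  (if (ep.1 = 0 ∧ sp.2 = 0) then [] else [horiz ++ vert ++ ['A']])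

def pvPairs : List (Char × Char) := pvKeys.flatMap (fun a => pvKeys.map (fun b => (a, b)))

-- {ab: min(... for c in _candidates(*ab)) for ab in pairs}; min over a nonempty list of Ints
-- (candidate list is never empty; `.getD 0` is the unreachable-empty stand-in for min's ValueError)
def pvMkCost (g : Char × Char → List Char → Int) : PySem.Dict (Char × Char) Int :=
  pvPairs.foldl (fun d ab => d.insert ab ((PySem.List.min? ((pvCandidates ab.1 ab.2).map (g ab)) id).getD 0)) PySem.Dict.empty

-- cost[pq] lookups: every pair of dpad keys is present in the table (KeyError unreachable),
-- final cost[(start, end)] raises KeyError on non-key strings — excluded by Pre_.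
def dpad_code_len_alt (start : String) (end_ : String) (depth : Int) : Int :=
  let cost0 := pvMkCost (fun _ p => (p.length : Int))
  let cost := (PySem.List.pyRange 0 (depth - 1) 1).foldl
    (fun C _ => pvMkCost (fun _ c => ((('A' :: c).zip c).map (fun pq => C.getD pq 0)).sum))
    cost0
  cost.getD (start.toList.headD ' ', end_.toList.headD ' ') 0

-- ===== PRECONDITION & SPEC =====
-- Exactly the inputs on which Python A returns: start/end must be dpad keys (else KeyError
-- on dpad[...]), depth must be in 1..25 (memo has keys 0..25 only, and depth ≤ 0 reaches
-- memo[-1] through the recursion — KeyError in both cases).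
def Pre_dpad_code_len (start : String) (end_ : String) (depth : Int) : Prop :=
  (start = "A" ∨ start = "^" ∨ start = "<" ∨ start = "v" ∨ start = ">") ∧
  (end_ = "A" ∨ end_ = "^" ∨ end_ = "<" ∨ end_ = "v" ∨ end_ = ">") ∧
  1 ≤ depth ∧ depth ≤ 25
instance (start : String) (end_ : String) (depth : Int) : Decidable (Pre_dpad_code_len start end_ depth) := by unfold Pre_dpad_code_len; infer_instance

def pvWitness_dpad_code_len : String × String × Int := ("v", "A", 3)

def Spec_dpad_code_len (start : String) (end_ : String) (depth : Int) (out : Int) : Prop := out = dpad_code_len_alt start end_ depth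
instance (start : String) (end_ : String) (depth : Int) (out : Int) : Decidable (Spec_dpad_code_len start end_ depth out) := by unfold Spec_dpad_code_len; infer_instance

-- ===== CLAIM (what is proved, stated in full; the proofs are below) =====
def Claim_equal_dpad_code_len : Prop := ∀ (start : String) (end_ : String) (depth : Int), Dom_dpad_code_len start end_ depth → Pre_dpad_code_len start end_ depth → Spec_dpad_code_len start end_ depth (dpad_code_len start end_ depth)

-- ===== LEMMAS AND PROOFS =====

-- the common mathematical content: per-level cost functions
def pvPairwise (f : Char → Char → Int) (path : List Char) : Int :=
  ((('A' :: path).zip path).map (fun pq => f pq.1 pq.2)).sum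

def pvBest (cost : List Char → Int) (a b : Char) : Int :=
  (PySem.List.min? ((pvCandidates a b).map cost) id).getD 0

def pvSpec : Nat → Char → Char → Int
  | 0, a, b => pvBest (fun p => (p.length : Int)) a b
  | d+1, a, b => pvBest (pvPairwise (pvSpec d)) a b

def pvCostF : Nat → List Char → Int
  | 0, p => (p.length : Int)
  | k+1, p => pvPairwise (pvSpec k) p

lemma pvSpec_eq_best (d : Nat) (a b : Char) : pvSpec d a b = pvBest (pvCostF d) a b := by
  cases d <;> rfl

-- A's branch ladder, abstracted over the cost of one path at the next level
def pvStepA (cost : List Char → Int) (s e : Char) : Int :=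
  let sp := pvDpadPos s
  let ep := pvDpadPos e
  let ox := ep.1 - sp.1
  let oy := ep.2 - sp.2
  let vp := List.replicate oy.natAbs (pvOffyChar oy) ++ List.replicate ox.natAbs (pvOffxChar ox) ++ ['A']
  let hp := List.replicate ox.natAbs (pvOffxChar ox) ++ List.replicate oy.natAbs (pvOffyChar oy) ++ ['A']
  if ox = 0 ∨ oy = 0 then cost vp
  else if s = '<' then cost hp
  else if e = '<' then cost vp
  else if cost vp ≤ cost hp then cost vp else cost hp

lemma pv_min2 (x y : Int) : (PySem.List.min? [x, y] id).getD 0 = if x ≤ y then x else y := by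
  simp only [PySem.List.min?, List.foldl, id]
  split_ifs <;> simp <;> omega

lemma pv_min1 (x : Int) : (PySem.List.min? [x] id).getD 0 = x := by
  simp [PySem.List.min?]

-- key combinatorial fact: A's ladder picks exactly the minimum over the valid candidates
set_option maxHeartbeats 1000000 in
lemma stepA_eq_best (cost : List Char → Int) (s e : Char) :
    pvStepA cost s e = pvBest cost s e := by
  have hs : s = 'A' ∨ s = '^' ∨ s = '<' ∨ s = 'v' ∨ (¬ s = 'A' ∧ ¬ s = '^' ∧ ¬ s = '<' ∧ ¬ s = 'v') := by tauto
  have he : e = 'A' ∨ e = '^' ∨ e = '<' ∨ e = 'v' ∨ (¬ e = 'A' ∧ ¬ e = '^' ∧ ¬ e = '<' ∧ ¬ e = 'v') := by tauto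
  rcases hs with rfl | rfl | rfl | rfl | ⟨hs1, hs2, hs3, hs4⟩ <;>
    rcases he with rfl | rfl | rfl | rfl | ⟨he1, he2, he3, he4⟩ <;>
    simp [pvStepA, pvBest, pvCandidates, pvDpadPos, pvPosB, pvOffxChar, pvOffyChar,
      pv_min1, pv_min2, List.replicate, *]

-- memo invariant: every stored value is the specified one
def PvInv (m : PySem.Dict (Nat × Char × Char) Int) : Prop :=
  ∀ (n : Nat) (s e : Char) (v : Int), m.get? (n+1, s, e) = some v → v = pvSpec n s e

lemma pvInv_empty : PvInv PySem.Dict.empty := by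
  intro n s e v h
  simp [PySem.Dict.get?_empty] at h

lemma pvInv_insert {m : PySem.Dict (Nat × Char × Char) Int} (hm : PvInv m)
    (d : Nat) (s e : Char) : PvInv (m.insert (d+1, s, e) (pvSpec d s e)) := by
  intro n s' e' v h
  rw [PySem.Dict.get?_insert] at h
  split at h
  · rename_i heq
    simp only [Prod.mk.injEq] at heq
    obtain ⟨h1, h2, h3⟩ := heq
    obtain rfl : n = d := by omega
    subst h2; subst h3
    simpa using h.symm
  · exact hm n s' e' v h

lemma pvLoopA_correct (d : Nat)
    (hIH : ∀ s e m, PvInv m → (pvGoA (d+1) s e m).1 = pvSpec d s e ∧ PvInv (pvGoA (d+1) s e m).2) :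
    ∀ (l : List (Char × Char)) (acc : Int) (m), PvInv m →
      (pvLoopA (d+1) l acc m).1 = acc + (l.map (fun pq => pvSpec d pq.1 pq.2)).sum ∧
      PvInv (pvLoopA (d+1) l acc m).2 := by
  intro l
  induction l with
  | nil => intro acc m hm; simpa [pvLoopA] using hm
  | cons pr rest ih =>
    intro acc m hm
    obtain ⟨h1, h2⟩ := hIH pr.1 pr.2 m hm
    obtain ⟨h3, h4⟩ := ih (acc + (pvGoA (d+1) pr.1 pr.2 m).1) (pvGoA (d+1) pr.1 pr.2 m).2 h2
    simp only [pvLoopA]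
    refine ⟨?_, h4⟩
    rw [h3, h1]
    simp [List.sum_cons]
    ring

lemma pvRecurA_correct (d : Nat)
    (hIH : ∀ k, k + 1 = d → ∀ s e m, PvInv m → (pvGoA d s e m).1 = pvSpec k s e ∧ PvInv (pvGoA d s e m).2) :
    ∀ (path : List Char) (m), PvInv m →
      (pvRecurA d path m).1 = pvCostF d path ∧ PvInv (pvRecurA d path m).2 := by
  intro path m hm
  cases d with
  | zero => simpa [pvRecurA, pvCostF] using hm
  | succ k =>
    simp only [pvRecurA, Nat.succ_ne_zero, if_false]
    obtain ⟨h1, h2⟩ := pvLoopA_correct k (hIH k rfl) (('A' :: path).zip path) 0 m hm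
    refine ⟨?_, h2⟩
    rw [h1]
    simp [pvCostF, pvPairwise]

lemma pvBranch (d : Nat) (s e : Char) (path : List Char) (m : PySem.Dict (Nat × Char × Char) Int)
    (hrec : ∀ path m, PvInv m → (pvRecurA d path m).1 = pvCostF d path ∧ PvInv (pvRecurA d path m).2)
    (hm : PvInv m) (hval : pvCostF d path = pvSpec d s e) :
    (pvRecurA d path m).1 = pvSpec d s e ∧
    PvInv ((pvRecurA d path m).2.insert (d + 1, s, e) (pvRecurA d path m).1) := by
  obtain ⟨h1, h2⟩ := hrec path m hm
  rw [h1, hval]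
  exact ⟨rfl, pvInv_insert h2 d s e⟩

lemma pvGoA_step (d : Nat)
    (hrec : ∀ path m, PvInv m → (pvRecurA d path m).1 = pvCostF d path ∧ PvInv (pvRecurA d path m).2)
    (s e : Char) (m : PySem.Dict (Nat × Char × Char) Int) (hm : PvInv m) :
    (pvGoA (d+1) s e m).1 = pvSpec d s e ∧ PvInv (pvGoA (d+1) s e m).2 := by
  have key : pvStepA (pvCostF d) s e = pvSpec d s e := by
    rw [stepA_eq_best, ← pvSpec_eq_best]
  simp only [pvGoA]
  cases hg : m.get? (d+1, s, e) with
  | some v => exact ⟨hm d s e v hg, hm⟩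
  | none =>
    by_cases h0 : (pvDpadPos e).1 - (pvDpadPos s).1 = 0 ∨ (pvDpadPos e).2 - (pvDpadPos s).2 = 0
    · rw [if_pos h0]
      exact pvBranch d s e _ m hrec hm (by rw [← key]; simp only [pvStepA]; rw [if_pos h0])
    · rw [if_neg h0]
      by_cases hs : s = '<'
      · rw [if_pos hs]
        exact pvBranch d s e _ m hrec hm (by rw [← key]; simp only [pvStepA]; rw [if_neg h0, if_pos hs])
      · rw [if_neg hs]
        by_cases he : e = '<'
        · rw [if_pos he]
          exact pvBranch d s e _ m hrec hm (by rw [← key]; simp only [pvStepA]; rw [if_neg h0, if_neg hs, if_pos he])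
        · rw [if_neg he]
          obtain ⟨hrv1, hrv2⟩ := hrec (List.replicate ((pvDpadPos e).2 - (pvDpadPos s).2).natAbs (pvOffyChar ((pvDpadPos e).2 - (pvDpadPos s).2)) ++ List.replicate ((pvDpadPos e).1 - (pvDpadPos s).1).natAbs (pvOffxChar ((pvDpadPos e).1 - (pvDpadPos s).1)) ++ ['A']) m hm
          obtain ⟨hrh1, hrh2⟩ := hrec (List.replicate ((pvDpadPos e).1 - (pvDpadPos s).1).natAbs (pvOffxChar ((pvDpadPos e).1 - (pvDpadPos s).1)) ++ List.replicate ((pvDpadPos e).2 - (pvDpadPos s).2).natAbs (pvOffyChar ((pvDpadPos e).2 - (pvDpadPos s).2)) ++ ['A']) (pvRecurA d (List.replicate ((pvDpadPos e).2 - (pvDpadPos s).2).natAbs (pvOffyChar ((pvDpadPos e).2 - (pvDpadPos s).2)) ++ List.replicate ((pvDpadPos e).1 - (pvDpadPos s).1).natAbs (pvOffxChar ((pvDpadPos e).1 - (pvDpadPos s).1)) ++ ['A']) m).2 hrv2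
          have hval : (if pvCostF d (List.replicate ((pvDpadPos e).2 - (pvDpadPos s).2).natAbs (pvOffyChar ((pvDpadPos e).2 - (pvDpadPos s).2)) ++ List.replicate ((pvDpadPos e).1 - (pvDpadPos s).1).natAbs (pvOffxChar ((pvDpadPos e).1 - (pvDpadPos s).1)) ++ ['A']) ≤ pvCostF d (List.replicate ((pvDpadPos e).1 - (pvDpadPos s).1).natAbs (pvOffxChar ((pvDpadPos e).1 - (pvDpadPos s).1)) ++ List.replicate ((pvDpadPos e).2 - (pvDpadPos s).2).natAbs (pvOffyChar ((pvDpadPos e).2 - (pvDpadPos s).2)) ++ ['A']) then pvCostF d (List.replicate ((pvDpadPos e).2 - (pvDpadPos s).2).natAbs (pvOffyChar ((pvDpadPos e).2 - (pvDpadPos s).2)) ++ List.replicate ((pvDpadPos e).1 - (pvDpadPos s).1).natAbs (pvOffxChar ((pvDpadPos e).1 - (pvDpadPos s).1)) ++ ['A']) else pvCostF d (List.replicate ((pvDpadPos e).1 - (pvDpadPos s).1).natAbs (pvOffxChar ((pvDpadPos e).1 - (pvDpadPos s).1)) ++ List.replicate ((pvDpadPos e).2 - (pvDpadPos s).2).natAbs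 (pvOffyChar ((pvDpadPos e).2 - (pvDpadPos s).2)) ++ ['A'])) = pvSpec d s e := by
            rw [← key]; simp only [pvStepA]; rw [if_neg h0, if_neg hs, if_neg he]
          rw [hrv1, hrh1]
          split_ifs with hc
          · rw [if_pos hc] at hval
            rw [hval]
            exact ⟨rfl, pvInv_insert hrh2 d s e⟩
          · rw [if_neg hc] at hval
            rw [hval]
            exact ⟨rfl, pvInv_insert hrh2 d s e⟩

lemma pvGoA_correct : ∀ (d : Nat) (s e : Char) (m : PySem.Dict (Nat × Char × Char) Int),
    PvInv m → (pvGoA (d+1) s e m).1 = pvSpec d s e ∧ PvInv (pvGoA (d+1) s e m).2 := by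
  intro d
  induction d with
  | zero =>
    exact pvGoA_step 0 (pvRecurA_correct 0 (fun k hk => by omega))
  | succ d ih =>
    exact pvGoA_step (d+1) (pvRecurA_correct (d+1) (fun k hk => by
      obtain rfl : k = d := by omega
      exact ih))

-- ----- B side -----
lemma getD_foldl_insert_fn (v : Char × Char → Int) :
    ∀ (l : List (Char × Char)) (d : PySem.Dict (Char × Char) Int) (k : Char × Char),
      (l.foldl (fun d x => d.insert x (v x)) d).getD k 0 = if k ∈ l then v k else d.getD k 0 := by
  intro l
  induction l with
  | nil => intro d k; simp
  | cons x xs ih =>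
    intro d k
    simp only [List.foldl_cons, ih, PySem.Dict.getD_insert, List.mem_cons]
    by_cases h1 : k ∈ xs <;> by_cases h2 : k = x <;> simp [h1, h2]

lemma getD_mkCost (g : Char × Char → List Char → Int) (ab : Char × Char) (hab : ab ∈ pvPairs) :
    (pvMkCost g).getD ab 0 = (PySem.List.min? ((pvCandidates ab.1 ab.2).map (g ab)) id).getD 0 := by
  unfold pvMkCost
  rw [getD_foldl_insert_fn (fun ab => (PySem.List.min? ((pvCandidates ab.1 ab.2).map (g ab)) id).getD 0) pvPairs PySem.Dict.empty ab]
  simp [hab]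

lemma mem_pvPairs_iff (a b : Char) : (a, b) ∈ pvPairs ↔ a ∈ pvKeys ∧ b ∈ pvKeys := by
  simp [pvPairs]

lemma mem_keys_of_mem_candidates {a b x : Char} {c : List Char}
    (hc : c ∈ pvCandidates a b) (hx : x ∈ c) : x ∈ pvKeys := by
  simp only [pvCandidates, List.mem_append] at hc
  rcases hc with hc | hc <;> split_ifs at hc <;>
    simp only [List.mem_singleton, List.not_mem_nil] at hc <;>
    subst hc <;>
    simp only [List.mem_append, List.mem_replicate, List.mem_singleton] at hx <;>
    (have hx5 : x = '^' ∨ x = 'v' ∨ x = '<' ∨ x = '>' ∨ x = 'A' := by tauto) <;>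
    rcases hx5 with rfl | rfl | rfl | rfl | rfl <;> decide

lemma pvFoldB_correct : ∀ (l : List Int) (C : PySem.Dict (Char × Char) Int) (k : Nat),
    (∀ ab ∈ pvPairs, C.getD ab 0 = pvSpec k ab.1 ab.2) →
    ∀ ab ∈ pvPairs,
      (l.foldl (fun C _ => pvMkCost (fun _ c => ((('A' :: c).zip c).map (fun pq => C.getD pq 0)).sum)) C).getD ab 0
        = pvSpec (k + l.length) ab.1 ab.2 := by
  intro l
  induction l with
  | nil => intro C k h ab hab; simpa using h ab hab
  | cons x xs ih =>
    intro C k h ab hab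
    simp only [List.foldl_cons, List.length_cons]
    have hstep : ∀ ab ∈ pvPairs,
        (pvMkCost (fun _ c => ((('A' :: c).zip c).map (fun pq => C.getD pq 0)).sum)).getD ab 0
          = pvSpec (k+1) ab.1 ab.2 := by
      intro ab hab
      rw [getD_mkCost _ _ hab]
      have hmap : (pvCandidates ab.1 ab.2).map (fun c => ((('A' :: c).zip c).map (fun pq => C.getD pq 0)).sum)
          = (pvCandidates ab.1 ab.2).map (pvPairwise (pvSpec k)) := by
        apply List.map_congr_left
        intro c hcmem
        unfold pvPairwise
        congr 1
        apply List.map_congr_left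
        intro pq hpq
        have h1 := List.of_mem_zip hpq
        have hx1 : pq.1 ∈ pvKeys := by
          rcases List.mem_cons.1 h1.1 with h' | h'
          · rw [h']; decide
          · exact mem_keys_of_mem_candidates hcmem h'
        have hx2 : pq.2 ∈ pvKeys := mem_keys_of_mem_candidates hcmem h1.2
        exact h (pq.1, pq.2) ((mem_pvPairs_iff _ _).2 ⟨hx1, hx2⟩)
      rw [hmap]
      rfl
    have hrec := ih (pvMkCost (fun _ c => ((('A' :: c).zip c).map (fun pq => C.getD pq 0)).sum)) (k+1) hstep ab hab
    rw [hrec]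
    have : k + 1 + xs.length = k + (xs.length + 1) := by omega
    rw [this]

lemma alt_eq_spec (start end_ : String) (depth : Int)
    (hs : (start.toList.headD ' ', end_.toList.headD ' ') ∈ pvPairs) (h1 : 1 ≤ depth) :
    dpad_code_len_alt start end_ depth = pvSpec (depth.toNat - 1) (start.toList.headD ' ') (end_.toList.headD ' ') := by
  unfold dpad_code_len_alt
  have hbase : ∀ ab ∈ pvPairs, (pvMkCost (fun _ p => (p.length : Int))).getD ab 0 = pvSpec 0 ab.1 ab.2 := by
    intro ab hab
    rw [getD_mkCost _ _ hab]
    rfl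
  have hlen : (PySem.List.pyRange 0 (depth - 1) 1).length = depth.toNat - 1 := by
    have hn : depth - 1 = ((depth.toNat - 1 : Nat) : Int) := by omega
    rw [hn, PySem.List.pyRange_zero_natCast]
    simp
  have hfold := pvFoldB_correct (PySem.List.pyRange 0 (depth - 1) 1)
    (pvMkCost (fun _ p => (p.length : Int))) 0 hbase
    (start.toList.headD ' ', end_.toList.headD ' ') hs
  rw [hlen, Nat.zero_add] at hfold
  exact hfold

-- ===== VERDICT (by name: the statement is the Claim_ definition above) =====
theorem dpad_code_len_spec : Claim_equal_dpad_code_len := by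
  intro start end_ depth _ hpre
  obtain ⟨hs, he, h1, h25⟩ := hpre
  unfold Spec_dpad_code_len
  have hcs : start.toList.headD ' ' ∈ pvKeys := by
    rcases hs with rfl | rfl | rfl | rfl | rfl <;> decide
  have hce : end_.toList.headD ' ' ∈ pvKeys := by
    rcases he with rfl | rfl | rfl | rfl | rfl <;> decide
  have hpair : (start.toList.headD ' ', end_.toList.headD ' ') ∈ pvPairs :=
    (mem_pvPairs_iff _ _).2 ⟨hcs, hce⟩
  obtain ⟨d, hd⟩ : ∃ d : Nat, depth.toNat = d + 1 := ⟨depth.toNat - 1, by omega⟩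
  unfold dpad_code_len
  rw [hd, (pvGoA_correct d _ _ _ pvInv_empty).1, alt_eq_spec _ _ _ hpair h1]
  have : depth.toNat - 1 = d := by omega
  rw [this]
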